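-- pv_equiv track=rewrite | github.com/antanvir/Machine-Learning-Algorithms | Apriori Algorithm/Apriori.py | has_frequent_subset
-- ===== SOURCE A (Python) =====
-- DELIMITER = ","
--
-- def has_frequent_subset(candidate, L):
--     toBeDeleted = list()
--     for elements in candidate:
--         items = elements.split(DELIMITER)
--         itemLen = len(items)
--         flag = True
--         for j in range(itemLen):
--             subset = ""
--             subsetLen = 0
--             for k in range(itemLen):
--                 if j != k:
--                 	subset += items[k]
--                 	subsetLen += 1
--                 	if itemLen - 1 != subsetLen:
--                 		subset += DELIMITER
--             if subset not in L:
--                 flag = False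
--                 break
--
--         if flag == False:
--             toBeDeleted.append(elements)
--
--     candidate = [values for values in candidate if values not in toBeDeleted]
--     return candidate
-- ===== SOURCE B (Python) =====
-- DELIMITER = ","
--
-- def has_frequent_subset(candidate, L):
--     # Different algorithm: one accumulating pass with a hash set of L (no inner scan of L,
--     # no toBeDeleted list, no second filter pass), and each leave-one-out subset is taken
--     # from precomputed prefix-join / suffix-join tables instead of being rebuilt item by item.
--     frequent = set(L)
--     result = []
--     for elements in candidate:
--         items = elements.split(DELIMITER)
--         n = len(items)
--         pref = [""] * (n + 1)          # pref[j] = ",".join(items[:j])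
--         for j in range(n):
--             pref[j + 1] = items[j] if j == 0 else pref[j] + DELIMITER + items[j]
--         suf = [""] * (n + 1)           # suf[j] = ",".join(items[j:])
--         for j in range(n - 1, -1, -1):
--             suf[j] = items[j] if j == n - 1 else items[j] + DELIMITER + suf[j + 1]
--         ok = True
--         for j in range(n):
--             if j == 0:
--                 sub = suf[1]
--             elif j == n - 1:
--                 sub = pref[j]
--             else:
--                 sub = pref[j] + DELIMITER + suf[j + 1]
--             if sub not in frequent:
--                 ok = False
--                 break
--         if ok:
--             result.append(elements)
--     return result
-- ===== Notes on version B (the rewrite author's own statement) =====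
-- stated objective: faster
-- what changed: Builds a hash set of L once so each subset test is an O(1) lookup instead of a scan of L, reads each leave-one-out subset from precomputed prefix-join/suffix-join tables instead of rebuilding it item by item with manual comma bookkeeping, and appends kept candidates directly instead of building a toBeDeleted list and filtering in a second pass.
import Mathlib
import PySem

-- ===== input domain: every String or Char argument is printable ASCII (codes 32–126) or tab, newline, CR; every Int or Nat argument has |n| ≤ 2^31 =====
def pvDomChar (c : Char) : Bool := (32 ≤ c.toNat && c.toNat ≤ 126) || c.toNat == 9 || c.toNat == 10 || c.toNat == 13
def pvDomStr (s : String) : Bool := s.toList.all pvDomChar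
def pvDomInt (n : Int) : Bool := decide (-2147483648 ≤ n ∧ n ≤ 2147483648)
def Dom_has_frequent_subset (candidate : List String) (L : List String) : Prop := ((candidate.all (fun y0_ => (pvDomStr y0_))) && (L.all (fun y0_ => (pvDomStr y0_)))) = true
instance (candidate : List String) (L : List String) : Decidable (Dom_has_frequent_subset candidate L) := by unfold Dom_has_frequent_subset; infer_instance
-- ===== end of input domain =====

-- B replaces A's algorithm: a hash set of L instead of repeated list scans, prefix-join and
-- suffix-join tables instead of rebuilding each leave-one-out subset item by item, and direct
-- accumulation of the kept candidates instead of a toBeDeleted list plus a second filter pass.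

-- ===== PORT A =====
def has_frequent_subset (candidate : List String) (L : List String) : List String :=
  let toBeDeleted : List String := candidate.foldl (fun tbd elements =>
    -- items = elements.split(","): the separator is the non-empty literal ",", so split? is always some
    let items := (PySem.Str.split? elements ",").getD []
    let itemLen : Int := items.length
    let flag := (PySem.List.pyRange 0 itemLen 1).foldl (fun flag j =>
      if flag then
        let st := (PySem.List.pyRange 0 itemLen 1).foldl (fun (st : String × Int) k =>
          if j ≠ k then
            let subset := st.1 ++ PySem.List.pyGetD items k ""
            let subsetLen := st.2 + 1
            if itemLen - 1 ≠ subsetLen then (subset ++ ",", subsetLen) else (subset, subsetLen)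
          else st) ("", 0)
        if ¬ (st.1 ∈ L) then false else flag
      else flag) true
    if flag = false then tbd ++ [elements] else tbd) []
  candidate.filter (fun values => !(toBeDeleted.contains values))

-- ===== PORT B =====
-- per-candidate keep test of B: prefix/suffix join tables, set lookup, break-guarded loop
def pvOkB (frequent : PySem.Set String) (elements : String) : Bool :=
  let items := (PySem.Str.split? elements ",").getD []
  let n := items.length
  -- pref[j] = ",".join(items[:j]), filled left to right (Python fills a preallocated array)
  let pref := (List.range n).foldl (fun (p : List String) j =>
    p ++ [if j = 0 then items.getD j "" else p.getD j "" ++ "," ++ items.getD j ""]) [""]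
  -- suf[j] = ",".join(items[j:]), filled right to left (for j in range(n-1, -1, -1): prepend)
  let suf := (List.range n).reverse.foldl (fun (s : List String) j =>
    (if j = n - 1 then items.getD j "" else items.getD j "" ++ "," ++ s.getD 0 "") :: s) [""]
  (List.range n).foldl (fun ok j =>
    if ok then
      let sub := if j = 0 then suf.getD 1 ""
                 else if j = n - 1 then pref.getD j ""
                 else pref.getD j "" ++ "," ++ suf.getD (j + 1) ""
      if ¬ (PySem.Set.contains frequent sub) then false else ok
    else ok) true

def has_frequent_subset_alt (candidate : List String) (L : List String) : List String :=
  let frequent : PySem.Set String := PySem.Set.ofList L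
  candidate.foldl (fun result elements =>
    if pvOkB frequent elements then result ++ [elements] else result) []

-- ===== PRECONDITION & SPEC =====
def Spec_has_frequent_subset (candidate : List String) (L : List String) (out : List String) : Prop := out = has_frequent_subset_alt candidate L
instance (candidate : List String) (L : List String) (out : List String) : Decidable (Spec_has_frequent_subset candidate L out) := by unfold Spec_has_frequent_subset; infer_instance

-- ===== CLAIM (what is proved, stated in full; the proofs are below) =====
def Claim_equal_has_frequent_subset : Prop := ∀ (candidate : List String) (L : List String), Dom_has_frequent_subset candidate L → Spec_has_frequent_subset candidate L (has_frequent_subset candidate L)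

-- ===== LEMMAS AND PROOFS =====

-- the common keep-predicate both sides are reduced to
def pvOk (L : List String) (elements : String) : Bool :=
  let items := (PySem.Str.split? elements ",").getD []
  (List.range items.length).all (fun j =>
    L.contains (PySem.Str.join "," (items.take j ++ items.drop (j + 1))))

-- ---------- A side ----------

-- A's inner subset-building loop for index j, named
def pvSubA (items : List String) (j : Int) : String × Int :=
  (PySem.List.pyRange 0 (items.length : Int) 1).foldl (fun (st : String × Int) k =>
    if j ≠ k then
      let subset := st.1 ++ PySem.List.pyGetD items k ""
      let subsetLen := st.2 + 1
      if (items.length : Int) - 1 ≠ subsetLen then (subset ++ ",", subsetLen) else (subset, subsetLen)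
    else st) ("", 0)

-- A's per-element flag, named (definitionally A's inline code)
def pvFlagA (L : List String) (elements : String) : Bool :=
  let items := (PySem.Str.split? elements ",").getD []
  (PySem.List.pyRange 0 (items.length : Int) 1).foldl (fun flag j =>
    if flag then
      (if ¬ ((pvSubA items j).1 ∈ L) then false else flag)
    else flag) true

def pvG (n : Int) : List String → String × Int → String × Int
  | [], st => st
  | v :: vs, st =>
      let subset := st.1 ++ v
      let subsetLen := st.2 + 1
      pvG n vs (if n - 1 ≠ subsetLen then (subset ++ ",", subsetLen) else (subset, subsetLen))

def pvIcat : List (List Char) → List Char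
  | [] => []
  | [v] => v
  | v :: w :: vs => v ++ ',' :: pvIcat (w :: vs)

lemma foldl_eq_pvG (n : Int) (vs : List String) (st : String × Int) :
    vs.foldl (fun (st : String × Int) v =>
        let subset := st.1 ++ v
        let subsetLen := st.2 + 1
        if n - 1 ≠ subsetLen then (subset ++ ",", subsetLen) else (subset, subsetLen)) st
      = pvG n vs st := by
  induction vs generalizing st with
  | nil => rfl
  | cons v rest ih => simp only [List.foldl_cons, pvG]; exact ih _

lemma pvG_run (n : Int) :
    ∀ (vs : List String) (s : String) (c : Int), c + vs.length = n - 1 →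
      (pvG n vs (s, c)).1.toList = s.toList ++ pvIcat (vs.map String.toList) := by
  intro vs
  induction vs with
  | nil => intro s c h; simp [pvG, pvIcat]
  | cons v rest ih =>
    intro s c h
    cases rest with
    | nil =>
      have hc : ¬ (n - 1 ≠ c + 1) := by simp only [List.length_cons, List.length_nil] at h; omega
      conv_lhs => rw [pvG]
      simp only [if_neg hc]
      simp [pvG, pvIcat, String.toList_append]
    | cons w ws =>
      have hc : n - 1 ≠ c + 1 := by simp only [List.length_cons] at h; omega
      have step1 : pvG n (v :: w :: ws) (s, c) = pvG n (w :: ws) (s ++ v ++ ",", c + 1) := by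
        conv_lhs => rw [pvG]
        simp only [if_pos hc]
      rw [step1, ih _ (c + 1) (by simp only [List.length_cons] at h ⊢; push_cast at h ⊢; omega)]
      simp [pvIcat, String.toList_append]

lemma pvRangeGetD (l : List String) :
    (List.range l.length).map (fun m => l.getD m "") = l := by
  induction l with
  | nil => simp
  | cons a rest ih =>
    rw [List.length_cons, List.range_succ_eq_map, List.map_cons, List.map_map]
    simpa using ih

lemma pvSel (items : List String) (jn : Nat) (h : jn < items.length) :
    ((List.range items.length).filter (fun k => decide (jn ≠ k))).map (fun k => items.getD k "") =
      items.take jn ++ items.drop (jn + 1) := by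
  induction items generalizing jn with
  | nil => simp at h
  | cons a rest ih =>
    rw [List.length_cons, List.range_succ_eq_map]
    cases jn with
    | zero =>
      rw [List.filter_cons, if_neg (by simp)]
      rw [List.filter_map, List.map_map]
      simp only [List.take_zero, List.drop_succ_cons, List.drop_zero, List.nil_append,
        Function.comp_def]
      calc ((List.range rest.length).filter fun k => decide (0 ≠ Nat.succ k)).map
              ((fun k => (a :: rest).getD k "") ∘ Nat.succ)
          = (List.range rest.length).map (fun m => rest.getD m "") := by
            rw [List.filter_eq_self.2 (by intro k _; simp)]
            simp [Function.comp_def]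
        _ = rest := pvRangeGetD rest
    | succ j' =>
      rw [List.filter_cons, if_pos (by simp)]
      rw [List.filter_map, List.map_cons, List.map_map]
      have hf : ((List.range rest.length).filter ((fun k => decide (j' + 1 ≠ k)) ∘ Nat.succ))
          = ((List.range rest.length).filter fun k => decide (j' ≠ k)) :=
        List.filter_congr (by intro k _; simp)
      rw [hf]
      have hm : ((List.range rest.length).filter fun k => decide (j' ≠ k)).map
              ((fun k => (a :: rest).getD k "") ∘ Nat.succ)
          = ((List.range rest.length).filter fun k => decide (j' ≠ k)).map
              (fun m => rest.getD m "") := by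
        simp [Function.comp_def]
      rw [hm, ih j' (by simpa using h)]
      simp

lemma pvIcat_eq_join (ps : List (List Char)) : pvIcat ps = PySem.Chars.join [','] ps := by
  induction ps with
  | nil => simp [pvIcat, PySem.Chars.join, List.intercalate]
  | cons v vs ih =>
    cases vs with
    | nil => simp [pvIcat, PySem.Chars.join, List.intercalate]
    | cons w ws =>
      simp only [pvIcat, ih]
      simp [PySem.Chars.join, List.intercalate, List.intersperse]

lemma pvSubA_eq (items : List String) (jn : Nat) (h : jn < items.length) :
    (pvSubA items (jn : Int)).1 =
      PySem.Str.join "," (items.take jn ++ items.drop (jn + 1)) := by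
  unfold pvSubA
  rw [PySem.List.pyRange_one]
  have h1 : ((items.length : Int) - 0).toNat = items.length := by omega
  rw [h1, List.foldl_map]
  have hstep : (fun (st : String × Int) (k : Nat) =>
      if (jn : Int) ≠ 0 + (k : Int) then
        let subset := st.1 ++ PySem.List.pyGetD items (0 + (k : Int)) ""
        let subsetLen := st.2 + 1
        if (items.length : Int) - 1 ≠ subsetLen then (subset ++ ",", subsetLen) else (subset, subsetLen)
      else st)
      = (fun (st : String × Int) (k : Nat) =>
        if jn ≠ k then
          (fun (st : String × Int) (v : String) =>
            let subset := st.1 ++ v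
            let subsetLen := st.2 + 1
            if (items.length : Int) - 1 ≠ subsetLen then (subset ++ ",", subsetLen) else (subset, subsetLen))
            st (items.getD k "")
        else st) := by
    funext st k
    simp [PySem.List.pyGetD_natCast]
  rw [hstep, PySem.List.foldl_ite_eq_foldl_filter]
  rw [← List.foldl_map (f := fun k => items.getD k "")
    (g := fun (st : String × Int) (v : String) =>
      let subset := st.1 ++ v
      let subsetLen := st.2 + 1
      if (items.length : Int) - 1 ≠ subsetLen then (subset ++ ",", subsetLen) else (subset, subsetLen))]
  rw [pvSel items jn h, foldl_eq_pvG]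
  apply String.toList_inj.mp
  rw [pvG_run _ _ _ _ (by
    have := List.length_take_of_le (l := items) (by omega : jn ≤ items.length)
    simp only [List.length_append, List.length_drop, this]
    push_cast; omega)]
  rw [PySem.Str.toList_join]
  have h2 : (",".toList : List Char) = [','] := by decide
  rw [h2, ← pvIcat_eq_join]
  simp

-- A's break-guarded flag loop is an all(...)
lemma pvFlag_fold {α : Type} (js : List α) (q : α → Prop) [DecidablePred q] (b : Bool) :
    js.foldl (fun flag j => if flag then (if ¬ q j then false else flag) else flag) b =
      (b && js.all (fun j => decide (q j))) := by
  induction js generalizing b with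
  | nil => simp
  | cons j rest ih =>
    cases b with
    | false => simpa using ih false
    | true =>
      by_cases hq : q j
      · simpa [hq] using ih true
      · simpa [hq] using ih false

lemma pvAllCongr {α : Type} (l : List α) (p q : α → Bool) (h : ∀ x ∈ l, p x = q x) :
    l.all p = l.all q := by
  induction l with
  | nil => rfl
  | cons a rest ih =>
    simp only [List.all_cons, h a (by simp)]
    rw [ih (fun x hx => h x (by simp [hx]))]

lemma pvDecide_contains (L : List String) (x : String) : decide (x ∈ L) = L.contains x := by
  by_cases hx : x ∈ L
  · simp [hx]
  · have hc : L.contains x = false := by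
      cases hc : L.contains x
      · rfl
      · exact absurd (List.contains_iff_mem.mp hc) hx
    simp [hx]

lemma pvFlag_eq_ok (L : List String) (e : String) : pvFlagA L e = pvOk L e := by
  unfold pvFlagA pvOk
  rw [pvFlag_fold, Bool.true_and, PySem.List.pyRange_one]
  have h1 : ((((PySem.Str.split? e ",").getD []).length : Int) - 0).toNat
      = ((PySem.Str.split? e ",").getD []).length := by omega
  rw [h1, List.all_map]
  apply pvAllCongr
  intro k hk
  simp only [Function.comp_apply, zero_add]
  rw [pvSubA_eq _ k (List.mem_range.mp hk), pvDecide_contains]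

lemma pvAEq (candidate L : List String) :
    has_frequent_subset candidate L = candidate.filter (fun v => pvFlagA L v) := by
  show candidate.filter (fun values =>
      !((candidate.foldl
          (fun tbd elements => if pvFlagA L elements = false then tbd ++ [elements] else tbd)
          []).contains values))
    = candidate.filter (fun v => pvFlagA L v)
  rw [PySem.List.foldl_append_ite_eq_filter (fun e => pvFlagA L e = false)]
  apply List.filter_congr
  intro v hv
  cases hf : pvFlagA L v
  · simp
    exact ⟨hv, hf⟩
  · simp
    exact Or.inr hf

-- ---------- B side ----------

def pvJ (l : List String) : String := PySem.Str.join "," l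

lemma pvJ_toList (l : List String) : (pvJ l).toList = pvIcat (l.map String.toList) := by
  unfold pvJ
  rw [PySem.Str.toList_join]
  have h2 : (",".toList : List Char) = [','] := by decide
  rw [h2, ← pvIcat_eq_join]

lemma pvIcat_append (a b : List (List Char)) (ha : a ≠ []) (hb : b ≠ []) :
    pvIcat (a ++ b) = pvIcat a ++ ',' :: pvIcat b := by
  induction a with
  | nil => exact absurd rfl ha
  | cons v vs ih =>
    cases vs with
    | nil =>
      cases b with
      | nil => exact absurd rfl hb
      | cons w ws => simp [pvIcat]
    | cons x xs =>
      have : pvIcat ((x :: xs) ++ b) = pvIcat (x :: xs) ++ ',' :: pvIcat b :=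
        ih (by simp) 
      simp only [List.cons_append, pvIcat]
      rw [List.cons_append] at this
      cases hx : (xs ++ b) with
      | nil => cases b <;> simp_all
      | cons y ys =>
        rw [← hx, this]
        simp

lemma pvJ_nil : pvJ [] = "" := by decide

lemma pvJ_singleton (x : String) : pvJ [x] = x := by
  apply String.toList_inj.mp
  rw [pvJ_toList]
  simp [pvIcat]

lemma pvJ_append (a b : List String) (ha : a ≠ []) (hb : b ≠ []) :
    pvJ (a ++ b) = pvJ a ++ "," ++ pvJ b := by
  apply String.toList_inj.mp
  rw [pvJ_toList, List.map_append,
    pvIcat_append _ _ (by simpa using ha) (by simpa using hb)]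
  simp [String.toList_append, pvJ_toList]

lemma pvJ_cons (x : String) (l : List String) (hl : l ≠ []) :
    pvJ (x :: l) = x ++ "," ++ pvJ l := by
  have := pvJ_append [x] l (by simp) hl
  simpa [pvJ_singleton] using this

-- the prefix table: pref = [",".join(items[:j]) for j in range(n+1)]
lemma pvPref_spec (items : List String) :
    ∀ m, m ≤ items.length →
      (List.range m).foldl (fun (p : List String) j =>
          p ++ [if j = 0 then items.getD j "" else p.getD j "" ++ "," ++ items.getD j ""]) [""]
        = (List.range (m + 1)).map (fun j => pvJ (items.take j)) := by
  intro m
  induction m with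
  | zero => intro _; simp [pvJ_nil]
  | succ m ih =>
    intro hm
    rw [List.range_succ, List.foldl_append, ih (by omega), List.foldl_cons, List.foldl_nil]
    have hget : ((List.range (m + 1)).map (fun j => pvJ (items.take j))).getD m ""
        = pvJ (items.take m) := by
      rw [List.getD_eq_getElem?_getD, List.getElem?_map,
        List.getElem?_range (by omega : m < m + 1)]
      rfl
    have hmlt : m < items.length := hm
    have hnew : (if m = 0 then items.getD m ""
        else ((List.range (m + 1)).map (fun j => pvJ (items.take j))).getD m "" ++ "," ++ items.getD m "")
        = pvJ (items.take (m + 1)) := by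
      have htake : items.take (m + 1) = items.take m ++ [items[m]] :=
        List.take_succ_eq_append_getElem hmlt
      by_cases h0 : m = 0
      · subst h0
        rw [if_pos rfl, htake]
        simp [pvJ_singleton, List.getD_eq_getElem?_getD, List.getElem?_eq_getElem hmlt]
      · rw [if_neg h0, hget, htake,
          pvJ_append _ _ (by
            intro hc
            have := congrArg List.length hc
            simp only [List.length_take, List.length_nil] at this
            omega) (by simp), pvJ_singleton]
        simp [List.getD_eq_getElem?_getD, List.getElem?_eq_getElem hmlt]
    rw [hnew]
    simp [List.range_succ]

-- the suffix table: suf = [",".join(items[j:]) for j in range(n+1)]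
lemma pvSuf_spec (items : List String) :
    ∀ d k, k + d = items.length →
      (List.range' k d).foldr (fun j (s : List String) =>
          (if j = items.length - 1 then items.getD j ""
           else items.getD j "" ++ "," ++ s.getD 0 "") :: s) [""]
        = (List.range' k (d + 1)).map (fun j => pvJ (items.drop j)) := by
  intro d
  induction d with
  | zero =>
    intro k hk
    simp [List.range'_succ, List.drop_eq_nil_of_le (by omega : items.length ≤ k), pvJ_nil]
  | succ d ih =>
    intro k hk
    rw [List.range'_succ, List.foldr_cons, ih (k + 1) (by omega)]
    have hklt : k < items.length := by omega
    have hhead : ((List.range' (k + 1) (d + 1)).map (fun j => pvJ (items.drop j))).getD 0 ""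
        = pvJ (items.drop (k + 1)) := by
      rw [List.range'_succ]
      rfl
    have hdrop : items.drop k = items[k] :: items.drop (k + 1) :=
      List.drop_eq_getElem_cons hklt
    have hnew : (if k = items.length - 1 then items.getD k ""
        else items.getD k "" ++ "," ++
          ((List.range' (k + 1) (d + 1)).map (fun j => pvJ (items.drop j))).getD 0 "")
        = pvJ (items.drop k) := by
      by_cases hlast : k = items.length - 1
      · rw [if_pos hlast, hdrop, List.drop_eq_nil_of_le (by omega), pvJ_singleton]
        simp [List.getD_eq_getElem?_getD, List.getElem?_eq_getElem hklt]
      · rw [if_neg hlast, hhead, hdrop,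
          pvJ_cons _ _ (by
            intro hc
            have := congrArg List.length hc
            simp only [List.length_drop, List.length_nil] at this
            omega)]
        simp [List.getD_eq_getElem?_getD, List.getElem?_eq_getElem hklt]
    rw [hnew]
    conv_rhs => rw [List.range'_succ]
    rw [List.map_cons]

lemma pvContains_ofList (L : List String) (x : String) :
    PySem.Set.contains (PySem.Set.ofList L) x = L.contains x := by
  by_cases h : x ∈ L <;>
    simp [PySem.Set.mem_ofList, h]

lemma pvGetD_map_range (f : Nat → String) (m j : Nat) (h : j < m) :
    ((List.range m).map f).getD j "" = f j := by
  rw [List.getD_eq_getElem?_getD, List.getElem?_map, List.getElem?_range h]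
  rfl

lemma pvOkB_core (L : List String) (items : List String) :
    (let n := items.length
     let pref := (List.range n).foldl (fun (p : List String) j =>
       p ++ [if j = 0 then items.getD j "" else p.getD j "" ++ "," ++ items.getD j ""]) [""]
     let suf := (List.range n).reverse.foldl (fun (s : List String) j =>
       (if j = n - 1 then items.getD j "" else items.getD j "" ++ "," ++ s.getD 0 "") :: s) [""]
     (List.range n).foldl (fun ok j =>
       if ok then
         let sub := if j = 0 then suf.getD 1 ""
                    else if j = n - 1 then pref.getD j ""
                    else pref.getD j "" ++ "," ++ suf.getD (j + 1) ""
         if ¬ (PySem.Set.contains (PySem.Set.ofList L) sub) then false else ok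
       else ok) true)
    = (List.range items.length).all (fun j =>
        L.contains (pvJ (items.take j ++ items.drop (j + 1)))) := by
  simp only [pvPref_spec items items.length le_rfl, List.foldl_reverse]
  rw [List.range_eq_range', pvSuf_spec items items.length 0 (by omega),
    ← List.range_eq_range', ← List.range_eq_range']
  rw [pvFlag_fold (List.range items.length)
    (fun j => (PySem.Set.contains (PySem.Set.ofList L)
      (if j = 0 then ((List.range (items.length + 1)).map (fun i => pvJ (items.drop i))).getD 1 ""
       else if j = items.length - 1 then
         ((List.range (items.length + 1)).map (fun i => pvJ (items.take i))).getD j ""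
       else ((List.range (items.length + 1)).map (fun i => pvJ (items.take i))).getD j "" ++ "," ++
         ((List.range (items.length + 1)).map (fun i => pvJ (items.drop i))).getD (j + 1) "")) = true),
    Bool.true_and]
  apply pvAllCongr
  intro j hj
  have hjn : j < items.length := List.mem_range.mp hj
  rw [Bool.decide_coe, pvContains_ofList]
  congr 1
  by_cases h0 : j = 0
  · subst h0
    rw [if_pos rfl, pvGetD_map_range _ _ _ (by omega)]
    simp
  · rw [if_neg h0]
    by_cases hlast : j = items.length - 1
    · rw [if_pos hlast, pvGetD_map_range _ _ _ (by omega)]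
      have : items.drop (j + 1) = [] := List.drop_eq_nil_of_le (by omega)
      rw [this, List.append_nil]
    · rw [if_neg hlast, pvGetD_map_range _ _ _ (by omega), pvGetD_map_range _ _ _ (by omega)]
      rw [pvJ_append _ _
        (by
          intro hc
          have := congrArg List.length hc
          simp only [List.length_take, List.length_nil] at this
          omega)
        (by
          intro hc
          have := congrArg List.length hc
          simp only [List.length_drop, List.length_nil] at this
          omega)]

lemma pvOkB_eq_ok (L : List String) (e : String) :
    pvOkB (PySem.Set.ofList L) e = pvOk L e := by
  unfold pvOkB pvOk
  exact pvOkB_core L _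

lemma pvBEq (candidate L : List String) :
    has_frequent_subset_alt candidate L = candidate.filter (fun v => pvOk L v) := by
  show candidate.foldl
      (fun result elements =>
        if pvOkB (PySem.Set.ofList L) elements then result ++ [elements] else result) []
    = candidate.filter (fun v => pvOk L v)
  rw [PySem.List.foldl_append_if_eq_filter (fun e => pvOkB (PySem.Set.ofList L) e)]
  rw [List.nil_append]
  exact List.filter_congr (fun v _ => pvOkB_eq_ok L v)

-- ===== VERDICT (by name: the statement is the Claim_ definition above) =====
theorem has_frequent_subset_spec : Claim_equal_has_frequent_subset := by
  intro candidate L _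
  unfold Spec_has_frequent_subset
  rw [pvAEq, pvBEq]
  exact List.filter_congr (fun v _ => pvFlag_eq_ok L v)
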